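-- pv_equiv track=rewrite | github.com/Christian99-dev/myreel-backend | api/security/endpoints_class.py | _path_matches
-- ===== SOURCE A (Python) =====
-- def _path_matches(route, path):
--     route_parts = route.strip('/').split('/')
--     path_parts = path.strip('/').split('/')
--
--     if len(route_parts) != len(path_parts):
--         return False
--
--     for route_part, path_part in zip(route_parts, path_parts):
--         if not (route_part.startswith('{') and route_part.endswith('}')) and route_part != path_part:
--             return False
--
--     return True
-- ===== SOURCE B (Python) =====
-- def _walk(r, p):
--     # r, p are remaining suffixes, each aligned at the start of a segment
--     i = r.find('/')
--     j = p.find('/')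
--     rseg = r if i < 0 else r[:i]
--     pseg = p if j < 0 else p[:j]
--     if not ((rseg.startswith('{') and rseg.endswith('}')) or rseg == pseg):
--         return False
--     if i < 0 or j < 0:
--         return i < 0 and j < 0
--     return _walk(r[i + 1:], p[j + 1:])
--
--
-- def _path_matches(route, path):
--     return _walk(route.strip('/'), path.strip('/'))
-- ===== Notes on version B (the rewrite author's own statement) =====
-- stated objective: alternative
-- what changed: Replaces A's split-into-lists plus length check plus zip loop by a single char-level two-pointer walk over the two stripped strings, locating one segment at a time with find('/') and never materialising the segment lists.
import Mathlib
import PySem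

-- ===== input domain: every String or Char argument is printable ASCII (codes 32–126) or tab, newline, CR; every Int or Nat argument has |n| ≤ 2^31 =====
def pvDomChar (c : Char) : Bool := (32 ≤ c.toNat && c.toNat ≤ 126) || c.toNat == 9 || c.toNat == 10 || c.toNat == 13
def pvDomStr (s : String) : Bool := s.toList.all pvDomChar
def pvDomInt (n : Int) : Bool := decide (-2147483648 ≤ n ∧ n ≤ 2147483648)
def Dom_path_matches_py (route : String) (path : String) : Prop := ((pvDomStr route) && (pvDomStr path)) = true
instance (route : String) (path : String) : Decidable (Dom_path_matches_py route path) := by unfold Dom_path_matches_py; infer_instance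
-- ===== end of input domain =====

-- B replaces A's strip/split/length-check/zip-loop by a single char-level two-pointer walk
-- over the two stripped strings (find('/') per segment, no intermediate lists): objective 'alternative'.


-- ===== PORT A =====
-- the 'for route_part, path_part in zip(...)' loop with its early 'return False'
def pvLoopA : List (List Char × List Char) → Bool
  | [] => true
  | (route_part, path_part) :: rest =>
    if ¬(PySem.Chars.startswith route_part ['{'] = true ∧ PySem.Chars.endswith route_part ['}'] = true)
        ∧ route_part ≠ path_part then false
    else pvLoopA rest

def path_matches_py (route : String) (path : String) : Bool :=
  let route_parts := PySem.Chars.splitOn (PySem.Chars.stripChars route.toList ['/']) ['/']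
  let path_parts := PySem.Chars.splitOn (PySem.Chars.stripChars path.toList ['/']) ['/']
  if route_parts.length ≠ path_parts.length then false
  else pvLoopA (route_parts.zip path_parts)

-- ===== PORT B =====
-- Source B's _walk: r, p are remaining suffixes, each aligned at the start of a segment
def pvWalk (r p : List Char) : Bool :=
  let i := PySem.Chars.find r ['/']
  let j := PySem.Chars.find p ['/']
  let rseg := if i < 0 then r else PySem.List.slice r none (some i)
  let pseg := if j < 0 then p else PySem.List.slice p none (some j)
  if ¬(((PySem.Chars.startswith rseg ['{'] && PySem.Chars.endswith rseg ['}']) || rseg == pseg) = true) then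
    false
  else if i < 0 ∨ j < 0 then
    decide (i < 0 ∧ j < 0)
  else
    pvWalk (PySem.List.slice r (some (i + 1)) none) (PySem.List.slice p (some (j + 1)) none)
termination_by r.length
decreasing_by
  · have hi : 0 ≤ PySem.Chars.find r ['/'] := by omega
    have hpre := (PySem.Chars.find_spec (s := r) (sub := ['/']) hi).1
    have hlt : (PySem.Chars.find r ['/']).toNat < r.length := by
      by_contra hc
      simp [List.drop_eq_nil_of_le (by omega : r.length ≤ (PySem.Chars.find r ['/']).toNat)] at hpre
    rw [PySem.List.slice_from r (by omega : (0:Int) ≤ PySem.Chars.find r ['/'] + 1)]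
    simp only [List.length_drop]
    omega

def path_matches_py_alt (route : String) (path : String) : Bool :=
  pvWalk (PySem.Chars.stripChars route.toList ['/']) (PySem.Chars.stripChars path.toList ['/'])

-- ===== PRECONDITION & SPEC =====
def Spec_path_matches_py (route : String) (path : String) (out : Bool) : Prop := out = path_matches_py_alt route path
instance (route : String) (path : String) (out : Bool) : Decidable (Spec_path_matches_py route path out) := by unfold Spec_path_matches_py; infer_instance

-- ===== CLAIM (what is proved, stated in full; the proofs are below) =====
def Claim_equal_path_matches_py : Prop := ∀ (route : String) (path : String), Dom_path_matches_py route path → Spec_path_matches_py route path (path_matches_py route path)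

-- ===== LEMMAS AND PROOFS =====

-- reference segmentation: split a char list at every '/'
def pvSegs : List Char → List (List Char)
  | [] => [[]]
  | c :: rest =>
    if c = '/' then [] :: pvSegs rest
    else
      match pvSegs rest with
      | [] => [[c]]
      | s :: ss => (c :: s) :: ss

-- reference joint recursion over two segment lists
def pvSegsMatch : List (List Char) → List (List Char) → Bool
  | [], [] => true
  | [], _ :: _ => false
  | _ :: _, [] => false
  | r :: rs, p :: ps =>
    (((PySem.Chars.startswith r ['{'] && PySem.Chars.endswith r ['}']) || r == p) && pvSegsMatch rs ps)

theorem pvSegs_ne_nil (cs : List Char) : pvSegs cs ≠ [] := by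
  cases cs with
  | nil => simp [pvSegs]
  | cons c rest =>
    simp only [pvSegs]
    split
    · simp
    · cases pvSegs rest <;> simp

theorem splitOn_go_eq (fuel : Nat) : ∀ (l cur : List Char) (acc : List (List Char)) (s : List Char)
    (ss : List (List Char)), l.length < fuel → pvSegs l = s :: ss →
    PySem.Chars.splitOn.go ['/'] fuel l cur acc = acc.reverse ++ (cur.reverse ++ s) :: ss := by
  induction fuel with
  | zero => intro l cur acc s ss h; omega
  | succ fuel ih =>
    intro l cur acc s ss hlen hsegs
    cases l with
    | nil =>
      simp [pvSegs] at hsegs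
      simp [PySem.Chars.splitOn.go, hsegs.1.symm, hsegs.2.symm]
    | cons c rest =>
      by_cases hc : c = '/'
      · subst hc
        simp only [pvSegs, if_pos] at hsegs
        obtain ⟨hs, hss⟩ := List.cons.inj hsegs
        obtain ⟨s', ss', hrest⟩ : ∃ s' ss', pvSegs rest = s' :: ss' := by
          cases h : pvSegs rest with
          | nil => exact absurd h (pvSegs_ne_nil rest)
          | cons a b => exact ⟨a, b, rfl⟩
        have hstep : PySem.Chars.splitOn.go ['/'] (fuel + 1) ('/' :: rest) cur acc
            = PySem.Chars.splitOn.go ['/'] fuel rest [] (cur.reverse :: acc) := by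
          simp [PySem.Chars.splitOn.go, List.isPrefixOf]
        rw [hstep, ih rest [] (cur.reverse :: acc) s' ss' (by simpa using hlen) hrest]
        simp [← hs, hss ▸ hrest]
      · simp only [pvSegs, if_neg hc] at hsegs
        obtain ⟨s', ss', hrest⟩ : ∃ s' ss', pvSegs rest = s' :: ss' := by
          cases h : pvSegs rest with
          | nil => exact absurd h (pvSegs_ne_nil rest)
          | cons a b => exact ⟨a, b, rfl⟩
        rw [hrest] at hsegs
        obtain ⟨hs, hss⟩ := List.cons.inj hsegs
        have hstep : PySem.Chars.splitOn.go ['/'] (fuel + 1) (c :: rest) cur acc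
            = PySem.Chars.splitOn.go ['/'] fuel rest (c :: cur) acc := by
          have hnp : ¬ (List.isPrefixOf ['/'] (c :: rest) = true) := by
            simp [List.isPrefixOf]
            exact fun h => hc h.symm
          simp [PySem.Chars.splitOn.go, hnp]
        rw [hstep, ih rest (c :: cur) acc s' ss' (by simpa using hlen) hrest]
        simp [← hs, ← hss]

theorem splitOn_eq_pvSegs (l : List Char) : PySem.Chars.splitOn l ['/'] = pvSegs l := by
  obtain ⟨s, ss, h⟩ : ∃ s ss, pvSegs l = s :: ss := by
    cases hh : pvSegs l with
    | nil => exact absurd hh (pvSegs_ne_nil l)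
    | cons a b => exact ⟨a, b, rfl⟩
  rw [PySem.Chars.splitOn, splitOn_go_eq (l.length + 1) l [] [] s ss (by omega) h]
  simp [h]

theorem prefix_slash_iff (l : List Char) : ['/'] <+: l ↔ ∃ t, l = '/' :: t := by
  constructor
  · intro h
    cases l with
    | nil => simp at h
    | cons c rest =>
      rcases List.cons_prefix_cons.mp h with ⟨h1, _⟩
      exact ⟨rest, by rw [h1]⟩
  · rintro ⟨t, ht⟩
    cases ht
    exact ⟨t, rfl⟩

theorem pvSegs_no_slash (cs : List Char) (h : ∀ i, i < cs.length → cs[i]! ≠ '/') :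
    pvSegs cs = [cs] := by
  induction cs with
  | nil => simp [pvSegs]
  | cons c rest ih =>
    have hc : c ≠ '/' := by
      have := h 0 (by simp)
      simpa using this
    have hr : pvSegs rest = [rest] := by
      apply ih
      intro i hi
      have := h (i + 1) (by simpa using hi)
      simpa using this
    simp [pvSegs, hc, hr]

theorem pvSegs_at_slash : ∀ (k : Nat) (cs : List Char), k < cs.length → cs[k]! = '/' →
    (∀ i, i < k → cs[i]! ≠ '/') →
    pvSegs cs = cs.take k :: pvSegs (cs.drop (k + 1)) := by
  intro k
  induction k with
  | zero =>
    intro cs hk hat _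
    cases cs with
    | nil => simp at hk
    | cons c rest =>
      have hc : c = '/' := by simpa using hat
      simp [pvSegs, hc]
  | succ k ih =>
    intro cs hk hat hbefore
    cases cs with
    | nil => simp at hk
    | cons c rest =>
      have hc : c ≠ '/' := by
        have := hbefore 0 (by omega)
        simpa using this
      have hr := ih rest (by simpa using hk) (by simpa using hat)
        (fun i hi => by
          have := hbefore (i + 1) (by omega)
          simpa using this)
      simp [pvSegs, hc, hr]

theorem find_neg_segs (cs : List Char) (h : PySem.Chars.find cs ['/'] < 0) :
    pvSegs cs = [cs] := by
  have hne : PySem.Chars.find cs ['/'] = -1 := by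
    have := PySem.Chars.neg_one_le_find (s := cs) (sub := ['/'])
    omega
  have hni : ¬ (['/'] <:+: cs) := (PySem.Chars.find_eq_neg_one_iff _ _).mp hne
  apply pvSegs_no_slash
  intro i hi hslash
  apply hni
  have h2 : cs[i] = '/' := by rwa [getElem!_pos cs i hi] at hslash
  refine ⟨cs.take i, cs.drop (i + 1), ?_⟩
  rw [← h2]
  have h1 : cs.take i ++ [cs[i]] ++ cs.drop (i + 1) = cs.take i ++ cs.drop i := by
    rw [List.drop_eq_getElem_cons hi]; simp
  rw [h1, List.take_append_drop]

theorem find_nonneg_segs (cs : List Char) (h : 0 ≤ PySem.Chars.find cs ['/']) :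
    (PySem.Chars.find cs ['/']).toNat < cs.length ∧
    pvSegs cs = cs.take (PySem.Chars.find cs ['/']).toNat ::
      pvSegs (cs.drop ((PySem.Chars.find cs ['/']).toNat + 1)) := by
  obtain ⟨hpre, hmin⟩ := PySem.Chars.find_spec (s := cs) (sub := ['/']) h
  set k := (PySem.Chars.find cs ['/']).toNat with hkdef
  obtain ⟨t, ht⟩ := (prefix_slash_iff _).mp hpre
  have hklen : k < cs.length := by
    by_contra hc
    rw [List.drop_eq_nil_of_le (by omega)] at ht
    simp at ht
  have hat : cs[k]! = '/' := by
    have hdk : cs.drop k = cs[k] :: cs.drop (k + 1) := List.drop_eq_getElem_cons hklen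
    rw [hdk] at ht
    have := (List.cons.inj ht).1
    simp [getElem!_pos cs k hklen, this]
  refine ⟨hklen, pvSegs_at_slash k cs hklen hat ?_⟩
  intro i hi hslash
  apply hmin i hi
  rw [prefix_slash_iff]
  have hilen : i < cs.length := by omega
  refine ⟨cs.drop (i + 1), ?_⟩
  rw [← hslash]
  exact (List.drop_eq_getElem_cons hilen).trans (by simp [getElem!_pos cs i hilen])

-- a nonempty destructuring of pvSegs, used repeatedly below
theorem pvSegs_dest (cs : List Char) : ∃ s ss, pvSegs cs = s :: ss := by
  cases hh : pvSegs cs with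
  | nil => exact absurd hh (pvSegs_ne_nil cs)
  | cons a b => exact ⟨a, b, rfl⟩

-- B's walk computes the joint recursion over the segment lists
theorem pvWalk_eq_segsMatch (r p : List Char) :
    pvWalk r p = pvSegsMatch (pvSegs r) (pvSegs p) := by
  fun_induction pvWalk r p with
  | case1 r p i j rseg pseg hfail =>
    simp only [rseg, pseg, i, j] at hfail
    by_cases hi : PySem.Chars.find r ['/'] < 0
    · by_cases hj : PySem.Chars.find p ['/'] < 0
      · rw [dif_pos hi, dif_pos hj] at hfail
        rw [find_neg_segs r hi, find_neg_segs p hj]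
        have hcond := eq_false_of_ne_true hfail
        simp [pvSegsMatch, hcond]
      · obtain ⟨hjl, hpsegs⟩ := find_nonneg_segs p (by omega)
        rw [dif_pos hi, dif_neg hj,
          PySem.List.slice_to p (by omega : (0:Int) ≤ PySem.Chars.find p ['/'])] at hfail
        rw [find_neg_segs r hi, hpsegs]
        have hcond := eq_false_of_ne_true hfail
        simp [pvSegsMatch, hcond]
    · obtain ⟨hil, hrsegs⟩ := find_nonneg_segs r (by omega)
      rw [hrsegs]
      by_cases hj : PySem.Chars.find p ['/'] < 0
      · rw [dif_neg hi, dif_pos hj,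
          PySem.List.slice_to r (by omega : (0:Int) ≤ PySem.Chars.find r ['/'])] at hfail
        rw [find_neg_segs p hj]
        have hcond := eq_false_of_ne_true hfail
        simp [pvSegsMatch, hcond]
      · obtain ⟨hjl, hpsegs⟩ := find_nonneg_segs p (by omega)
        rw [dif_neg hi, dif_neg hj,
          PySem.List.slice_to r (by omega : (0:Int) ≤ PySem.Chars.find r ['/']),
          PySem.List.slice_to p (by omega : (0:Int) ≤ PySem.Chars.find p ['/'])] at hfail
        rw [hpsegs]
        have hcond := eq_false_of_ne_true hfail
        simp [pvSegsMatch, hcond]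
  | case2 r p i j rseg pseg hok hstop =>
    simp only [rseg, pseg, i, j] at hok
    simp only [i, j] at hstop ⊢
    by_cases hi : PySem.Chars.find r ['/'] < 0
    · by_cases hj : PySem.Chars.find p ['/'] < 0
      · rw [dif_pos hi, dif_pos hj] at hok
        rw [find_neg_segs r hi, find_neg_segs p hj]
        simp only [pvSegsMatch]
        simp [not_not.mp hok, hi, hj]
      · obtain ⟨hjl, hpsegs⟩ := find_nonneg_segs p (by omega)
        rw [find_neg_segs r hi, hpsegs]
        obtain ⟨s', ss', hrest⟩ := pvSegs_dest (p.drop ((PySem.Chars.find p ['/']).toNat + 1))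
        rw [hrest]
        simp only [pvSegsMatch]
        simp [hi, hj]
    · have hj : PySem.Chars.find p ['/'] < 0 := by
        rcases hstop with h | h
        · exact absurd h hi
        · exact h
      obtain ⟨hil, hrsegs⟩ := find_nonneg_segs r (by omega)
      rw [hrsegs, find_neg_segs p hj]
      obtain ⟨s', ss', hrest⟩ := pvSegs_dest (r.drop ((PySem.Chars.find r ['/']).toNat + 1))
      rw [hrest]
      simp only [pvSegsMatch]
      simp [hi, hj]
  | case3 r p i j rseg pseg hok hstop ih =>
    simp only [rseg, pseg, i, j] at hok
    simp only [i, j] at hstop ih ⊢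
    have hi : ¬ PySem.Chars.find r ['/'] < 0 := fun h => hstop (Or.inl h)
    have hj : ¬ PySem.Chars.find p ['/'] < 0 := fun h => hstop (Or.inr h)
    obtain ⟨hil, hrsegs⟩ := find_nonneg_segs r (by omega)
    obtain ⟨hjl, hpsegs⟩ := find_nonneg_segs p (by omega)
    rw [hrsegs, hpsegs]
    simp only [pvSegsMatch]
    rw [dif_neg hi, dif_neg hj,
      PySem.List.slice_to r (by omega : (0:Int) ≤ PySem.Chars.find r ['/']),
      PySem.List.slice_to p (by omega : (0:Int) ≤ PySem.Chars.find p ['/'])] at hok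
    have hiton : (PySem.Chars.find r ['/'] + 1).toNat = (PySem.Chars.find r ['/']).toNat + 1 := by
      omega
    have hjton : (PySem.Chars.find p ['/'] + 1).toNat = (PySem.Chars.find p ['/']).toNat + 1 := by
      omega
    rw [PySem.List.slice_from r (by omega : (0:Int) ≤ PySem.Chars.find r ['/'] + 1),
      PySem.List.slice_from p (by omega : (0:Int) ≤ PySem.Chars.find p ['/'] + 1),
      hiton, hjton] at ih ⊢
    rw [ih]
    simp [not_not.mp hok]

-- A's length check + zip loop computes the same joint recursion
theorem pvLoopA_eq_segsMatch : ∀ (rs ps : List (List Char)),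
    (if rs.length ≠ ps.length then false else pvLoopA (rs.zip ps)) = pvSegsMatch rs ps := by
  intro rs
  induction rs with
  | nil => intro ps; cases ps <;> simp [pvLoopA, pvSegsMatch]
  | cons r rs ih =>
    intro ps
    cases ps with
    | nil => simp [pvSegsMatch]
    | cons p ps =>
      by_cases hs : PySem.Chars.startswith r ['{'] = true <;>
        by_cases he : PySem.Chars.endswith r ['}'] = true <;>
        by_cases hrp : r = p <;>
        simp [pvLoopA, pvSegsMatch, hs, he, hrp, ← ih ps]

-- ===== VERDICT (by name: the statement is the Claim_ definition above) =====
theorem path_matches_py_spec : Claim_equal_path_matches_py := by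
  intro route path _
  unfold Spec_path_matches_py path_matches_py path_matches_py_alt
  rw [splitOn_eq_pvSegs, splitOn_eq_pvSegs, pvLoopA_eq_segsMatch, pvWalk_eq_segsMatch]
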